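-- pv_equiv track=rewrite | github.com/liuxsh9/sft-label | src/sft_label/preprocessing.py | _truncate_turns_to_budget
-- ===== SOURCE A (Python) =====
-- def _truncate_turns_to_budget(turns, budget):
--     """Preserve turns in order, truncating the last kept turn if needed to fit budget."""
--     kept = []
--     remaining = budget
--     for turn in turns:
--         if remaining <= 0:
--             break
--         value = turn.get("value", "")
--         if len(value) <= remaining:
--             kept.append(dict(turn))
--             remaining -= len(value)
--             continue
--         if remaining < len(_TRUNCATION_MARKER) + 300:
--             truncated_value = value[:remaining]
--         else:
--             truncated_value = _truncate_text(value, remaining)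
--         kept.append({**turn, "value": truncated_value})
--         remaining = 0
--         break
--     return kept, remaining
--
-- _TRUNCATION_MARKER = "\n\n[... content truncated for labeling ...]\n\n"
--
-- def _truncate_text(text, max_chars, keep_head_ratio=0.3):
--     """Truncate a single text block, keeping head + tail with a marker in between."""
--     if len(text) <= max_chars:
--         return text
--     marker_len = len(_TRUNCATION_MARKER)
--     head_chars = int(max_chars * keep_head_ratio)
--     tail_chars = max_chars - head_chars - marker_len
--     if tail_chars < 200:
--         tail_chars = 200
--         head_chars = max_chars - tail_chars - marker_len
--     if head_chars < 100:
--         head_chars = 100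
--     return text[:head_chars] + _TRUNCATION_MARKER + text[-tail_chars:]
-- ===== SOURCE B (Python) =====
-- _TRUNCATION_MARKER = "\n\n[... content truncated for labeling ...]\n\n"
--
--
-- def _chop(text, max_chars):
--     # head+tail-with-marker truncation for max_chars >= 344 and len(text) > max_chars
--     head = min(3 * max_chars // 10, max_chars - 244)
--     tail = max_chars - len(_TRUNCATION_MARKER) - head
--     return text[:head] + _TRUNCATION_MARKER + text[-tail:]
--
--
-- def _truncate_turns_to_budget(turns, budget):
--     """Preserve turns in order, truncating the last kept turn if needed to fit budget.
--
--     Instead of a stateful loop with an early break, characterise the split point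
--     declaratively: turn i is kept in full iff P[i] < budget and P[i+1] <= budget,
--     where P are the prefix sums of the value lengths.  Since P is nondecreasing
--     (lengths are nonnegative) this predicate is prefix-closed, so the number of
--     kept-in-full turns is simply the COUNT of indices satisfying it.
--     """
--     P = [0]
--     for t in turns:
--         P.append(P[-1] + len(t.get("value", "")))
--     k = sum(1 for a, b in zip(P, P[1:]) if a < budget and b <= budget)
--     kept = [dict(t) for t in turns[:k]]
--     leftover = budget - P[k]
--     if leftover > 0 and k < len(turns):
--         value = turns[k].get("value", "")
--         if leftover < len(_TRUNCATION_MARKER) + 300: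
--             tv = value[:leftover]
--         else:
--             tv = _chop(value, leftover)
--         return kept + [{**turns[k], "value": tv}], 0
--     return kept, leftover
-- ===== Notes on version B (the rewrite author's own statement) =====
-- stated objective: alternative
-- what changed: replaces A's stateful loop with early break by a declarative characterisation: prefix sums of value lengths are computed once, the number of fully-kept turns is the count of indices whose prefix-sum pair satisfies a pointwise predicate (valid because prefix sums are nondecreasing), then a bulk copy of that prefix and one boundary truncation step; the head/tail clamp cascade of _truncate_text collapses to a single min() formula
import Mathlib
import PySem

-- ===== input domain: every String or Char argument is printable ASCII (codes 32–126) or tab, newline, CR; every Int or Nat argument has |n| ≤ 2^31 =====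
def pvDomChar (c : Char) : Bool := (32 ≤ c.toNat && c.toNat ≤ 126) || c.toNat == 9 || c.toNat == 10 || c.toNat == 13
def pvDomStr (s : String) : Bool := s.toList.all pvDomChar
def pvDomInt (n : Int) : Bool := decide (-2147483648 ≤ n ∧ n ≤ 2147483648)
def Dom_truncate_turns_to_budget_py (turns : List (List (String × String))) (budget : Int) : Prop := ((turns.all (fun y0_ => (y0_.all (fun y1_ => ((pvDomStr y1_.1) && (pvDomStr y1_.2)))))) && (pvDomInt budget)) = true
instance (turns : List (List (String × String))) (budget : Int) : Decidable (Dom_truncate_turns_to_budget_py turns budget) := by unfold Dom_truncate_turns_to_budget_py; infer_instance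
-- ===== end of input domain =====

-- B replaces A's stateful break-early loop by a declarative characterisation: the number of
-- fully-kept turns is the COUNT of indices whose prefix sums satisfy a pointwise predicate
-- (correct because prefix sums are nondecreasing), followed by one boundary truncation step.

-- _TRUNCATION_MARKER
def pvMarker : String := "\n\n[... content truncated for labeling ...]\n\n"

-- turn.get("value", "")  — first-match association-list lookup (dict lookup)
def pvGetValue : List (String × String) → String
  | [] => ""
  | (k, v) :: rest => if k == "value" then v else pvGetValue rest

-- {**turn, "value": tv}  — overwrite "value" in place if present, else append (dict semantics)
def pvSetValue (turn : List (String × String)) (tv : String) : List (String × String) :=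
  if turn.any (fun p => p.1 == "value") then
    turn.map (fun p => if p.1 == "value" then ("value", tv) else p)
  else turn ++ [("value", tv)]

-- ===== PORT A =====
-- _truncate_text (keep_head_ratio is always the default 0.3 at the call site)
def truncate_text_py (text : String) (max_chars : Int) : String :=
  if PySem.Str.len text ≤ max_chars then text
  else
    let marker_len := PySem.Str.len pvMarker
    -- int(max_chars * 0.3): exact equal to (3*max_chars)//10 for 0 ≤ max_chars ≤ 2^31 (float analysis; verified)
    let head_chars := PySem.Int.floordiv (3 * max_chars) 10
    let tail_chars := max_chars - head_chars - marker_len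
    let tail_chars' := if tail_chars < 200 then (200 : Int) else tail_chars
    let head_chars' := if tail_chars < 200 then max_chars - tail_chars' - marker_len else head_chars
    let head_chars'' := if head_chars' < 100 then (100 : Int) else head_chars'
    PySem.Str.slice text none (some head_chars'') ++ pvMarker ++ PySem.Str.slice text (some (-tail_chars')) none

-- the for-loop of A, with its kept/remaining state and early break
def pvLoopA : List (List (String × String)) → List (List (String × String)) → Int → (List (List (String × String))) × Int
  | [], kept, remaining => (kept, remaining)
  | turn :: rest, kept, remaining =>
    if remaining ≤ 0 then (kept, remaining)
    else
      let value := pvGetValue turn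
      if PySem.Str.len value ≤ remaining then
        pvLoopA rest (kept ++ [turn]) (remaining - PySem.Str.len value)
      else
        let tv := if remaining < PySem.Str.len pvMarker + 300
                  then PySem.Str.slice value none (some remaining)
                  else truncate_text_py value remaining
        (kept ++ [pvSetValue turn tv], 0)

def truncate_turns_to_budget_py (turns : List (List (String × String))) (budget : Int) : (List (List (String × String))) × Int :=
  pvLoopA turns [] budget

-- ===== PORT B =====
-- _chop from Source B
def pvChop (text : String) (max_chars : Int) : String :=
  let head := min (PySem.Int.floordiv (3 * max_chars) 10) (max_chars - 244)
  let tail := max_chars - PySem.Str.len pvMarker - head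
  PySem.Str.slice text none (some head) ++ pvMarker ++ PySem.Str.slice text (some (-tail)) none

-- the P-building loop of Source B: P = [0]; for each len l, append P[-1] + l (acc carries P[-1])
def pvScan : Int → List Int → List Int
  | _, [] => []
  | acc, l :: rest => (acc + l) :: pvScan (acc + l) rest

def truncate_turns_to_budget_py_alt (turns : List (List (String × String))) (budget : Int) : (List (List (String × String))) × Int :=
  let lens := turns.map (fun t => PySem.Str.len (pvGetValue t))
  let P := 0 :: pvScan 0 lens
  -- k = sum(1 for a, b in zip(P, P[1:]) if a < budget and b <= budget)
  let k := (P.zip P.tail).countP (fun p => decide (p.1 < budget) && decide (p.2 ≤ budget))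
  let kept := turns.take k
  let leftover := budget - P.getD k 0
  if 0 < leftover ∧ k < turns.length then
    let turn := (turns[k]?).getD []   -- turns[k]; the guard guarantees k < len(turns)
    let value := pvGetValue turn
    let tv := if leftover < PySem.Str.len pvMarker + 300
              then PySem.Str.slice value none (some leftover)
              else pvChop value leftover
    (kept ++ [pvSetValue turn tv], 0)
  else (kept, leftover)

-- ===== PRECONDITION & SPEC =====
def Spec_truncate_turns_to_budget_py (turns : List (List (String × String))) (budget : Int) (out : (List (List (String × String))) × Int) : Prop := out = truncate_turns_to_budget_py_alt turns budget
instance (turns : List (List (String × String))) (budget : Int) (out : (List (List (String × String))) × Int) : Decidable (Spec_truncate_turns_to_budget_py turns budget out) := by unfold Spec_truncate_turns_to_budget_py; infer_instance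

-- ===== CLAIM =====
def Claim_equal_truncate_turns_to_budget_py : Prop := ∀ (turns : List (List (String × String))) (budget : Int), Dom_truncate_turns_to_budget_py turns budget → Spec_truncate_turns_to_budget_py turns budget (truncate_turns_to_budget_py turns budget)

-- ===== LEMMAS AND PROOFS =====

theorem pvMarker_len : PySem.Str.len pvMarker = 44 := by decide

theorem pvChop_eq_truncate_text (text : String) (n : Int)
    (h344 : 344 ≤ n) (hlen : n < PySem.Str.len text) :
    pvChop text n = truncate_text_py text n := by
  simp only [pvChop, truncate_text_py, pvMarker_len]
  rw [if_neg (by omega)]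
  rw [PySem.Int.floordiv_eq_ediv_of_pos (by omega : (0:Int) < 10)]
  by_cases h1 : n - 3 * n / 10 - 44 < 200
  · rw [if_pos h1, if_pos h1, if_neg (show ¬ (n - 200 - 44 < 100) by omega)]
    have e2 : n - 44 - min (3 * n / 10) (n - 244) = 200 := by omega
    have e1 : min (3 * n / 10) (n - 244) = n - 200 - 44 := by omega
    rw [e2, e1]
  · rw [if_neg h1, if_neg h1, if_neg (show ¬ (3 * n / 10 < 100) by omega)]
    have e2 : n - 44 - min (3 * n / 10) (n - 244) = n - 3 * n / 10 - 44 := by omega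
    rw [e2, min_eq_left (by omega)]

-- pvScan with base a is the base-0 scan shifted by a
theorem pvLen_nonneg (s : String) : 0 ≤ PySem.Str.len s := by simp

theorem pvScan_shift (a : Int) (xs : List Int) :
    pvScan a xs = (pvScan 0 xs).map (a + ·) := by
  induction xs generalizing a with
  | nil => simp [pvScan]
  | cons l rest ih =>
    simp only [pvScan, List.map_cons, zero_add]
    congr 1
    rw [ih (a + l), ih l, List.map_map]
    congr 1
    funext x; simp; ring

theorem pvScan_length (a : Int) (xs : List Int) : (pvScan a xs).length = xs.length := by
  induction xs generalizing a with
  | nil => simp [pvScan]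
  | cons l rest ih => simp only [pvScan, List.length_cons, ih]

-- every element of pvScan a xs is ≥ a when xs is nonnegative
theorem pvScan_ge (a : Int) (xs : List Int) (hnn : ∀ x ∈ xs, 0 ≤ x) :
    ∀ y ∈ pvScan a xs, a ≤ y := by
  induction xs generalizing a with
  | nil => simp [pvScan]
  | cons l rest ih =>
    intro y hy
    simp only [pvScan, List.mem_cons] at hy
    have hl : 0 ≤ l := hnn l (by simp)
    rcases hy with h | h
    · omega
    · have := ih (a + l) (fun x hx => hnn x (by simp [hx])) y h
      omega

theorem alt_nil (b : Int) : truncate_turns_to_budget_py_alt [] b = ([], b) := by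
  simp [truncate_turns_to_budget_py_alt, pvScan]

theorem countP_le_snd (P Q : List Int) (p : Int × Int → Bool) :
    (P.zip Q).countP p ≤ Q.length := by
  calc (P.zip Q).countP p ≤ (P.zip Q).length := List.countP_le_length
    _ ≤ Q.length := by rw [List.length_zip]; omega

-- when the first pair fails the predicate, every later pair fails too (prefix sums nondecreasing)
theorem count_tail_zero (l b : Int) (lens : List Int)
    (hnn : ∀ x ∈ lens, 0 ≤ x) (hl : 0 ≤ l) (hfail : ¬ (0 < b ∧ l ≤ b)) :
    (((l :: pvScan l lens)).zip (pvScan l lens)).countP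
      (fun p => decide (p.1 < b) && decide (p.2 ≤ b)) = 0 := by
  rw [List.countP_eq_zero]
  intro p hp
  have h1 : p.1 ∈ l :: pvScan l lens := List.of_mem_zip hp |>.1
  have hge : l ≤ p.1 := by
    rcases List.mem_cons.mp h1 with h | h
    · omega
    · exact pvScan_ge l lens hnn _ h
  simp only [Bool.and_eq_true, decide_eq_true_eq, not_and]
  intro h
  omega

theorem lens_nonneg (rest : List (List (String × String))) :
    ∀ x ∈ rest.map (fun t => PySem.Str.len (pvGetValue t)), 0 ≤ x := by
  intro x hx
  simp only [List.mem_map] at hx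
  obtain ⟨t, _, rfl⟩ := hx
  exact pvLen_nonneg _

-- cons recurrences of the alt function --------------------------------------

theorem alt_cons_neg (turn : List (String × String)) (rest : List (List (String × String)))
    (b : Int) (h : b ≤ 0) : truncate_turns_to_budget_py_alt (turn :: rest) b = ([], b) := by
  simp only [truncate_turns_to_budget_py_alt, List.map_cons, pvScan, zero_add, List.tail_cons]
  rw [List.zip_cons_cons, List.countP_cons]
  rw [count_tail_zero _ _ _ (lens_nonneg rest) (pvLen_nonneg _) (by omega)]
  have hif : (decide (((0 : Int), PySem.Str.len (pvGetValue turn)).1 < b) &&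
      decide (((0 : Int), PySem.Str.len (pvGetValue turn)).2 ≤ b)) = false := by
    simp only [Bool.and_eq_false_iff, decide_eq_false_iff_not]
    left; omega
  rw [hif]
  simp only [Bool.false_eq_true, if_false, Nat.zero_add, List.getD, List.getElem?_cons_zero,
    Option.getD_some]
  rw [if_neg (by intro hc; omega)]
  simp

theorem alt_cons_over (turn : List (String × String)) (rest : List (List (String × String)))
    (b : Int) (h1 : 0 < b) (h2 : b < PySem.Str.len (pvGetValue turn)) :
    truncate_turns_to_budget_py_alt (turn :: rest) b =
      ([pvSetValue turn (if b < PySem.Str.len pvMarker + 300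
          then PySem.Str.slice (pvGetValue turn) none (some b)
          else pvChop (pvGetValue turn) b)], 0) := by
  simp only [truncate_turns_to_budget_py_alt, List.map_cons, pvScan, zero_add, List.tail_cons]
  rw [List.zip_cons_cons, List.countP_cons]
  rw [count_tail_zero _ _ _ (lens_nonneg rest) (pvLen_nonneg _) (by omega)]
  have hif : (decide (((0 : Int), PySem.Str.len (pvGetValue turn)).1 < b) &&
      decide (((0 : Int), PySem.Str.len (pvGetValue turn)).2 ≤ b)) = false := by
    simp only [Bool.and_eq_false_iff, decide_eq_false_iff_not]
    right; omega
  rw [hif]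
  simp only [Bool.false_eq_true, if_false, Nat.zero_add, List.getD, List.getElem?_cons_zero,
    Option.getD_some]
  rw [if_pos (by refine ⟨by omega, ?_⟩; simp only [List.length_cons]; omega)]
  simp

theorem alt_cons_fit (turn : List (String × String)) (rest : List (List (String × String)))
    (b : Int) (h1 : 0 < b) (h2 : PySem.Str.len (pvGetValue turn) ≤ b) :
    truncate_turns_to_budget_py_alt (turn :: rest) b =
      (turn :: (truncate_turns_to_budget_py_alt rest (b - PySem.Str.len (pvGetValue turn))).1,
       (truncate_turns_to_budget_py_alt rest (b - PySem.Str.len (pvGetValue turn))).2) := by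
  set l := PySem.Str.len (pvGetValue turn) with hl
  set lens' := rest.map (fun t => PySem.Str.len (pvGetValue t)) with hlens
  simp only [truncate_turns_to_budget_py_alt, List.map_cons, pvScan, zero_add, List.tail_cons,
    ← hl, ← hlens]
  rw [List.zip_cons_cons, List.countP_cons]
  have hif : (decide (((0 : Int), l).1 < b) && decide (((0 : Int), l).2 ≤ b)) = true := by
    simp only [Bool.and_eq_true, decide_eq_true_eq]
    exact ⟨by omega, h2⟩
  rw [hif, if_pos rfl]
  -- rewrite the shifted tail as a mapped base-0 scan
  rw [pvScan_shift l lens']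
  have hzip : ((l :: (pvScan 0 lens').map (l + ·)).zip ((pvScan 0 lens').map (l + ·)))
      = ((0 :: pvScan 0 lens').zip (pvScan 0 lens')).map (Prod.map (l + ·) (l + ·)) := by
    have hcons : (l :: (pvScan 0 lens').map (l + ·)) = ((0 :: pvScan 0 lens').map (l + ·)) := by
      simp
    rw [hcons, List.zip_map]
  rw [hzip, List.countP_map]
  have hpred : ((fun p : Int × Int => decide (p.1 < b) && decide (p.2 ≤ b)) ∘ Prod.map (l + ·) (l + ·))
      = (fun p : Int × Int => decide (p.1 < b - l) && decide (p.2 ≤ b - l)) := by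
    funext p
    simp only [Function.comp_apply, Prod.map]
    congr 1 <;> exact decide_eq_decide.mpr (by omega)
  rw [hpred]
  set k' := ((0 :: pvScan 0 lens').zip (pvScan 0 lens')).countP
      (fun p : Int × Int => decide (p.1 < b - l) && decide (p.2 ≤ b - l)) with hk'
  have hlenP : (pvScan 0 lens').length = lens'.length := pvScan_length 0 lens'
  have hk'le : k' ≤ lens'.length := by
    have := countP_le_snd (0 :: pvScan 0 lens') (pvScan 0 lens')
      (fun p : Int × Int => decide (p.1 < b - l) && decide (p.2 ≤ b - l))
    omega
  have hrestlen : lens'.length = rest.length := by rw [hlens, List.length_map]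
  have hk'' : k' < (0 :: pvScan 0 lens').length := by
    simp only [List.length_cons]; omega
  -- index k'+1 of the prefix list is l + index k' of the rest's prefix list (always in range)
  have hgetD : ((0 : Int) :: l :: (pvScan 0 lens').map (l + ·)).getD (k' + 1) 0
      = l + ((0 :: pvScan 0 lens').getD k' 0) := by
    simp only [List.getD, List.getElem?_cons_succ]
    rw [show (l :: (pvScan 0 lens').map (l + ·)) = ((0 :: pvScan 0 lens').map (l + ·)) by simp]
    rw [List.getElem?_map, List.getElem?_eq_getElem hk'']
    simp
  rw [hgetD]
  have hleft : b - (l + ((0 :: pvScan 0 lens').getD k' 0)) = b - l - ((0 :: pvScan 0 lens').getD k' 0) := by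
    ring
  rw [hleft]
  set L := (0 :: pvScan 0 lens').getD k' 0 with hL
  by_cases hg : 0 < b - l - L ∧ k' < rest.length
  · rw [if_pos (by refine ⟨hg.1, ?_⟩; simp only [List.length_cons]; omega)]
    rw [if_pos hg]
    simp only [List.take_succ_cons, List.getElem?_cons_succ]
    simp
  · rw [if_neg (by simp only [List.length_cons]; intro hc; exact hg ⟨hc.1, by omega⟩)]
    rw [if_neg hg]
    simp

theorem pvLoopA_eq (turns : List (List (String × String))) (budget : Int)
    (kept : List (List (String × String))) :
    pvLoopA turns kept budget =
      (kept ++ (truncate_turns_to_budget_py_alt turns budget).1,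
       (truncate_turns_to_budget_py_alt turns budget).2) := by
  induction turns generalizing kept budget with
  | nil => simp [pvLoopA, alt_nil]
  | cons turn rest ih =>
    by_cases h0 : budget ≤ 0
    · rw [alt_cons_neg turn rest budget h0]
      simp [pvLoopA, if_pos h0]
    · by_cases h2 : PySem.Str.len (pvGetValue turn) ≤ budget
      · rw [alt_cons_fit turn rest budget (by omega) h2]
        simp only [pvLoopA, if_neg h0, if_pos h2]
        rw [ih]
        simp
      · rw [alt_cons_over turn rest budget (by omega) (by omega)]
        simp only [pvLoopA, if_neg h0, if_neg h2]
        by_cases hm : budget < PySem.Str.len pvMarker + 300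
        · rw [if_pos hm, if_pos hm]
        · rw [if_neg hm, if_neg hm,
            pvChop_eq_truncate_text (pvGetValue turn) budget (by
              have := pvMarker_len; omega) (by omega)]

-- ===== VERDICT =====
theorem truncate_turns_to_budget_py_spec : Claim_equal_truncate_turns_to_budget_py := by
  intro turns budget _
  show truncate_turns_to_budget_py turns budget = truncate_turns_to_budget_py_alt turns budget
  rw [truncate_turns_to_budget_py, pvLoopA_eq]
  simp
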